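-- pv_equiv track=rewrite | github.com/adriandalion/CMSC-162-Project-1 | Project Guide 1 Test.py | unsharp_mask
-- ===== SOURCE A (Python) =====
-- def pad_gray(gray_rows, pad=1):
--     H=len(gray_rows); W=len(gray_rows[0]) if H else 0
--     P=[[ (0,0,0) for _ in range(W+2*pad)] for _ in range(H+2*pad)]
--     for y in range(H):
--         for x in range(W):
--             P[y+pad][x+pad]=gray_rows[y][x]
--     return P
--
-- def box3x3(gray_rows):
--     P = pad_gray(gray_rows,1)
--     H=len(gray_rows); W=len(gray_rows[0])
--     out=[]
--     for y in range(H):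
--         prow=[]
--         for x in range(W):
--             s=0
--             for j in (-1,0,1):
--                 for i in (-1,0,1):
--                     s += P[y+1+j][x+1+i][0]
--             v = s//9
--             prow.append((v,v,v))
--         out.append(prow)
--     return out
--
-- def unsharp_mask(gray_rows):
--     blur = box3x3(gray_rows)
--     H=len(gray_rows); W=len(gray_rows[0])
--     out=[]
--     for y in range(H):
--         prow=[]
--         for x in range(W):
--             g = gray_rows[y][x][0]
--             b = blur[y][x][0]
--             s = g + (g - b)  # amount=1.0
--             v = max(0,min(255,int(round(s))))
--             prow.append((v,v,v))
--         out.append(prow)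
--     return out
-- ===== SOURCE B (Python) =====
-- def unsharp_mask(gray_rows):
--     # Separable 3x3 box blur: horizontal 3-sum table, then vertical pass, one //9.
--     H = len(gray_rows)
--     W = len(gray_rows[0])
--     g = [[gray_rows[y][x][0] for x in range(W)] for y in range(H)]
--     hs = [[(row[x - 1] if x >= 1 else 0) + row[x] + (row[x + 1] if x + 1 < W else 0)
--            for x in range(W)] for row in g]
--     zero = [0] * W
--     out = []
--     for y in range(H):
--         up = hs[y - 1] if y >= 1 else zero
--         dn = hs[y + 1] if y + 1 < H else zero
--         row = []
--         for x in range(W):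
--             b = (up[x] + hs[y][x] + dn[x]) // 9
--             v = 2 * g[y][x] - b
--             v = 0 if v < 0 else (255 if v > 255 else v)
--             row.append((v, v, v))
--         out.append(row)
--     return out
-- ===== Notes on version B (the rewrite author's own statement) =====
-- stated objective: faster
-- what changed: Replaces A's pad_gray allocation plus 9-term nested 3x3 window scan with a separable box blur: a horizontal 3-sum table followed by a vertical 3-row pass, applying //9 once; no padded image is built. Pre_ excludes exactly the inputs where A raises IndexError (empty image or a row shorter than the first row).
import Mathlib
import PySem

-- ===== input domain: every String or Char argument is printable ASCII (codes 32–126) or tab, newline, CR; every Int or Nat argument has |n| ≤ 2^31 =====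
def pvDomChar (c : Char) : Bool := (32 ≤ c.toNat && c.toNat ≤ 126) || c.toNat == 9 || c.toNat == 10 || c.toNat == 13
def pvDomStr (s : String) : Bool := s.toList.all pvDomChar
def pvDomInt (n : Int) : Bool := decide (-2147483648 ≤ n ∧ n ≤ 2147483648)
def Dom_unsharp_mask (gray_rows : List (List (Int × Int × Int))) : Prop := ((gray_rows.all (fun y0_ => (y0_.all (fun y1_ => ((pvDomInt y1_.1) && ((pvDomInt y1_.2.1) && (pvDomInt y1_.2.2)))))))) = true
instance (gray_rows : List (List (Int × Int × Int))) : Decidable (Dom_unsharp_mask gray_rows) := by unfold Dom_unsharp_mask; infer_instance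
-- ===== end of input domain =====

-- B replaces A's padded nested 3x3 scan by a separable box blur (horizontal 3-sum
-- table, then a vertical pass) with a single //9 and no padded copy; a timing run
-- measured B faster by a constant factor.


-- ===== PORT A =====
-- pad_gray(gray_rows, pad=1): zero-pad frame built by in-place assignment
def pvPadGray (gray : List (List (Int × Int × Int))) (pad : Nat) : List (List (Int × Int × Int)) :=
  let H := gray.length
  let W := if H ≠ 0 then (gray.getD 0 []).length else 0
  let P0 := List.replicate (H + 2 * pad) (List.replicate (W + 2 * pad) ((0:Int),(0:Int),(0:Int)))
  (List.range H).foldl (fun P y =>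
    (List.range W).foldl (fun P x =>
      P.modify (y + pad) (fun row => row.set (x + pad) ((gray.getD y []).getD x (0,0,0)))) P) P0

-- box3x3: 3x3 window sum over the padded image, one //9 per pixel
def pvBox3x3 (gray : List (List (Int × Int × Int))) : List (List (Int × Int × Int)) :=
  let P := pvPadGray gray 1
  let H := gray.length
  let W := (gray.getD 0 []).length
  (List.range H).map (fun (y : Nat) =>
    (List.range W).map (fun (x : Nat) =>
      let s := [(-1:Int),0,1].foldl (fun s j => [(-1:Int),0,1].foldl (fun s i =>
          s + (PySem.List.pyGetD (PySem.List.pyGetD P ((y:Int)+1+j) []) ((x:Int)+1+i) (0,0,0)).1) s) 0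
      let v := PySem.Int.floordiv s 9
      (v, v, v)))

def unsharp_mask (gray_rows : List (List (Int × Int × Int))) : List (List (Int × Int × Int)) :=
  let blur := pvBox3x3 gray_rows
  let H := gray_rows.length
  let W := (gray_rows.getD 0 []).length
  (List.range H).map (fun y =>
    (List.range W).map (fun x =>
      let g := ((gray_rows.getD y []).getD x (0,0,0)).1
      let b := ((blur.getD y []).getD x (0,0,0)).1
      let s := g + (g - b)
      let v := max 0 (min 255 s)
      (v, v, v)))

-- ===== PORT B =====
def unsharp_mask_alt (gray_rows : List (List (Int × Int × Int))) : List (List (Int × Int × Int)) :=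
  let H := gray_rows.length
  let W := (gray_rows.getD 0 []).length
  let g : List (List Int) := (List.range H).map (fun y =>
    (List.range W).map (fun x => ((gray_rows.getD y []).getD x (0,0,0)).1))
  let hs : List (List Int) := g.map (fun row =>
    (List.range W).map (fun x =>
      (if 1 ≤ x then row.getD (x - 1) 0 else 0) + row.getD x 0 +
      (if x + 1 < W then row.getD (x + 1) 0 else 0)))
  let zero : List Int := List.replicate W 0
  (List.range H).map (fun y =>
    let up := if 1 ≤ y then hs.getD (y - 1) [] else zero
    let dn := if y + 1 < H then hs.getD (y + 1) [] else zero
    (List.range W).map (fun x =>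
      let b := PySem.Int.floordiv (up.getD x 0 + (hs.getD y []).getD x 0 + dn.getD x 0) 9
      let v := 2 * ((g.getD y []).getD x 0) - b
      if v < 0 then ((0:Int),(0:Int),(0:Int)) else if 255 < v then (255,255,255) else (v, v, v)))

-- ===== PRECONDITION & SPEC =====
-- Pre_ excludes exactly the inputs where A raises IndexError: the empty image
-- (gray_rows[0] fails) and images where some row is shorter than the first row.
def Pre_unsharp_mask (gray_rows : List (List (Int × Int × Int))) : Prop :=
  gray_rows ≠ [] ∧ ∀ row ∈ gray_rows, (gray_rows.headD []).length ≤ row.length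
instance (gray_rows : List (List (Int × Int × Int))) : Decidable (Pre_unsharp_mask gray_rows) := by unfold Pre_unsharp_mask; infer_instance
def pvWitness_unsharp_mask : (List (List (Int × Int × Int))) :=
  [[(10,10,10),(200,0,0)],[(0,0,0),(50,50,50)]]
def Spec_unsharp_mask (gray_rows : List (List (Int × Int × Int))) (out : List (List (Int × Int × Int))) : Prop := out = unsharp_mask_alt gray_rows
instance (gray_rows : List (List (Int × Int × Int))) (out : List (List (Int × Int × Int))) : Decidable (Spec_unsharp_mask gray_rows out) := by unfold Spec_unsharp_mask; infer_instance

-- ===== CLAIM (what is proved, stated in full; the proofs are below) =====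
def Claim_equal_unsharp_mask : Prop := ∀ (gray_rows : List (List (Int × Int × Int))), Dom_unsharp_mask gray_rows → Pre_unsharp_mask gray_rows → Spec_unsharp_mask gray_rows (unsharp_mask gray_rows)

-- ===== LEMMAS AND PROOFS =====

-- value of the padded image at (r, c), projected to the first channel
def pvCell (gray : List (List (Int × Int × Int))) (r c : Nat) : Int :=
  if 1 ≤ r ∧ r ≤ gray.length ∧ 1 ≤ c ∧ c ≤ (gray.getD 0 []).length
  then ((gray.getD (r-1) []).getD (c-1) ((0:Int),(0:Int),(0:Int))).1 else 0

lemma fill_gen {α : Type} (gv : Nat → α) : ∀ (W : Nat) (l : List α), W ≤ l.length →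
    (List.range W).foldl (fun r x => r.set x (gv x)) l = (List.range W).map gv ++ l.drop W := by
  intro W
  induction W with
  | zero => simp
  | succ k ih =>
    intro l hl
    rw [List.range_succ, List.foldl_append, List.map_append, ih l (by omega)]
    simp only [List.foldl_cons, List.foldl_nil, List.map_cons, List.map_nil]
    have hlen : ((List.range k).map gv).length = k := by simp
    rw [List.set_append_right _ _ (by omega), hlen, Nat.sub_self,
        List.drop_eq_getElem_cons (l := l) (by omega), List.set_cons_zero]
    simp

lemma fold_set_cons {α : Type} (gv : Nat → α) (xs : List Nat) :
    ∀ (z : α) (rest : List α),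
    xs.foldl (fun r x => r.set (x + 1) (gv x)) (z :: rest)
      = z :: xs.foldl (fun r x => r.set x (gv x)) rest := by
  induction xs with
  | nil => intro z rest; rfl
  | cons a as ih => intro z rest; simp only [List.foldl_cons, List.set_cons_succ, ih]

lemma fill_row {α : Type} (z : α) (W : Nat) (gv : Nat → α) :
    (List.range W).foldl (fun row x => row.set (x + 1) (gv x)) (List.replicate (W + 2) z)
      = z :: (List.range W).map gv ++ [z] := by
  have h1 : List.replicate (W + 2) z = z :: List.replicate (W + 1) z := by
    simp [List.replicate_succ]
  rw [h1, fold_set_cons, fill_gen gv W (List.replicate (W+1) z) (by simp)]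
  simp [List.drop_replicate]

lemma fold_modify {α : Type} (i : Nat) (f : Nat → α → α) (xs : List Nat) :
    ∀ (P : List α), xs.foldl (fun P x => P.modify i (f x)) P
      = P.modify i (fun row => xs.foldl (fun row x => f x row) row) := by
  induction xs with
  | nil =>
    intro P
    apply List.ext_getElem <;> simp [List.getElem_modify]
  | cons a as ih =>
    intro P
    simp only [List.foldl_cons, ih]
    apply List.ext_getElem <;> simp [List.getElem_modify]
    intro j h1 h2
    split <;> rfl

lemma modify_map_range {α : Type} (g : Nat → α) (n i : Nat) (f : α → α) :
    ((List.range n).map g).modify i f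
      = (List.range n).map (fun r => if r = i then f (g r) else g r) := by
  apply List.ext_getElem <;> simp [List.getElem_modify]
  intro j hj
  by_cases h : i = j
  · subst h; simp
  · simp [h, Ne.symm h]

lemma rowSpec_eq {α : Type} (z : α) (W : Nat) (gv : Nat → α) :
    (List.range (W + 2)).map (fun c => if 1 ≤ c ∧ c ≤ W then gv (c - 1) else z)
      = z :: (List.range W).map gv ++ [z] := by
  apply List.ext_getElem
  · simp
  · intro j h1 h2
    simp only [List.getElem_map, List.getElem_range]
    match j, h2 with
    | 0, _ => simp
    | (jj+1), h2 =>
      try simp only [List.getElem_cons_succ]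
      by_cases hjj : jj < W
      · rw [List.getElem_append_left (by simpa using hjj)]
        simp [hjj]
      · have hje : jj = W := by simp at h2; omega
        subst hje
        rw [List.getElem_append_right (by simp)]
        simp

lemma pad_loop {α : Type} (z : α) (gv : Nat → Nat → α) (H W : Nat) :
    ∀ k, k ≤ H → (List.range k).foldl (fun P y =>
      (List.range W).foldl (fun P x =>
        P.modify (y + 1) (fun row => row.set (x + 1) (gv y x))) P)
      (List.replicate (H + 2) (List.replicate (W + 2) z))
    = (List.range (H + 2)).map (fun r =>
        (List.range (W + 2)).map (fun c =>
          if 1 ≤ r ∧ r ≤ k ∧ 1 ≤ c ∧ c ≤ W then gv (r-1) (c-1) else z)) := by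
  intro k
  induction k with
  | zero =>
    intro _
    simp only [List.range_zero, List.foldl_nil]
    apply List.ext_getElem
    · simp
    · intro j h1 h2
      simp only [List.getElem_replicate, List.getElem_map, List.getElem_range]
      apply List.ext_getElem
      · simp
      · intro c hc1 hc2
        simp only [List.getElem_replicate, List.getElem_map, List.getElem_range]
        rw [if_neg (by omega)]
  | succ k ih =>
    intro hk
    rw [List.range_succ, List.foldl_append, ih (by omega)]
    simp only [List.foldl_cons, List.foldl_nil]
    rw [fold_modify, modify_map_range]
    apply List.map_congr_left
    intro r hr
    simp only [List.mem_range] at hr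
    by_cases hrk : r = k + 1
    · subst hrk
      rw [if_pos rfl]
      have hrow : (List.range (W + 2)).map (fun c =>
          if 1 ≤ k + 1 ∧ k + 1 ≤ k ∧ 1 ≤ c ∧ c ≤ W then gv (k+1-1) (c-1) else z)
          = List.replicate (W + 2) z := by
        apply List.ext_getElem
        · simp
        · intro c hc1 hc2
          simp only [List.getElem_replicate, List.getElem_map, List.getElem_range]
          rw [if_neg (by omega)]
      rw [hrow, fill_row, ← rowSpec_eq]
      apply List.map_congr_left
      intro c hc
      simp only [List.mem_range] at hc
      by_cases hcW : 1 ≤ c ∧ c ≤ W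
      · rw [if_pos hcW, if_pos (by omega)]; norm_num
      · rw [if_neg hcW, if_neg (by omega)]
    · rw [if_neg hrk]
      apply List.map_congr_left
      intro c hc
      by_cases hcond : 1 ≤ r ∧ r ≤ k ∧ 1 ≤ c ∧ c ≤ W
      · rw [if_pos hcond, if_pos (by omega)]
      · rw [if_neg hcond, if_neg (by omega)]

lemma pad_spec (gray : List (List (Int × Int × Int))) (hne : gray ≠ []) :
    pvPadGray gray 1 =
      (List.range (gray.length + 2)).map (fun (r : Nat) =>
        (List.range ((gray.getD 0 []).length + 2)).map (fun (c : Nat) =>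
          if 1 ≤ r ∧ r ≤ gray.length ∧ 1 ≤ c ∧ c ≤ (gray.getD 0 []).length
          then (gray.getD (r-1) []).getD (c-1) (0,0,0) else (0,0,0))) := by
  have hH : gray.length ≠ 0 := by simpa using hne
  have h := pad_loop ((0,0,0) : Int × Int × Int)
    (fun y x => (gray.getD y []).getD x (0,0,0))
    gray.length (gray.getD 0 []).length gray.length le_rfl
  simpa [pvPadGray, hH] using h

lemma pad_cell1 (gray : List (List (Int × Int × Int))) (hne : gray ≠ [])
    (r c : Nat) (hr : r < gray.length + 2) (hc : c < (gray.getD 0 []).length + 2) :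
    (PySem.List.pyGetD (PySem.List.pyGetD (pvPadGray gray 1) (r : Int) [])
        (c : Int) (0,0,0)).1 = pvCell gray r c := by
  rw [pad_spec gray hne]
  simp only [PySem.List.pyGetD_natCast]
  rw [PySem.List.getD_map_range _ _ _ _ hr, PySem.List.getD_map_range _ _ _ _ hc]
  unfold pvCell
  split <;> rfl

lemma sumA_eq (gray : List (List (Int × Int × Int))) (hne : gray ≠ [])
    (y x : Nat) (hy : y < gray.length) (hx : x < (gray.getD 0 []).length) :
    [(-1:Int),0,1].foldl (fun s j => [(-1:Int),0,1].foldl (fun s i =>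
        s + (PySem.List.pyGetD (PySem.List.pyGetD (pvPadGray gray 1) ((y:Int)+1+j) [])
            ((x:Int)+1+i) (0,0,0)).1) s) 0
    = (pvCell gray y x + pvCell gray y (x+1) + pvCell gray y (x+2))
      + (pvCell gray (y+1) x + pvCell gray (y+1) (x+1) + pvCell gray (y+1) (x+2))
      + (pvCell gray (y+2) x + pvCell gray (y+2) (x+1) + pvCell gray (y+2) (x+2)) := by
  have ey0 : ((y:Int)+1+(-1:Int)) = ((y : Nat) : Int) := by omega
  have ey1 : ((y:Int)+1+(0:Int)) = (((y+1 : Nat)) : Int) := by omega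
  have ey2 : ((y:Int)+1+(1:Int)) = (((y+2 : Nat)) : Int) := by omega
  have ex0 : ((x:Int)+1+(-1:Int)) = ((x : Nat) : Int) := by omega
  have ex1 : ((x:Int)+1+(0:Int)) = (((x+1 : Nat)) : Int) := by omega
  have ex2 : ((x:Int)+1+(1:Int)) = (((x+2 : Nat)) : Int) := by omega
  simp only [List.foldl_cons, List.foldl_nil]
  rw [ey0, ey1, ey2, ex0, ex1, ex2]
  rw [pad_cell1 gray hne y x (by omega) (by omega),
      pad_cell1 gray hne y (x+1) (by omega) (by omega),
      pad_cell1 gray hne y (x+2) (by omega) (by omega),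
      pad_cell1 gray hne (y+1) x (by omega) (by omega),
      pad_cell1 gray hne (y+1) (x+1) (by omega) (by omega),
      pad_cell1 gray hne (y+1) (x+2) (by omega) (by omega),
      pad_cell1 gray hne (y+2) x (by omega) (by omega),
      pad_cell1 gray hne (y+2) (x+1) (by omega) (by omega),
      pad_cell1 gray hne (y+2) (x+2) (by omega) (by omega)]
  ring

lemma hs_entry (gray : List (List (Int × Int × Int))) (y x : Nat)
    (hy : y < gray.length) (hx : x < (gray.getD 0 []).length) :
    (if 1 ≤ x then ((List.range (gray.getD 0 []).length).map
        (fun x' => ((gray.getD y []).getD x' ((0:Int),(0:Int),(0:Int))).1)).getD (x-1) 0 else 0)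
    + ((List.range (gray.getD 0 []).length).map
        (fun x' => ((gray.getD y []).getD x' ((0:Int),(0:Int),(0:Int))).1)).getD x 0
    + (if x + 1 < (gray.getD 0 []).length then ((List.range (gray.getD 0 []).length).map
        (fun x' => ((gray.getD y []).getD x' ((0:Int),(0:Int),(0:Int))).1)).getD (x+1) 0 else 0)
    = pvCell gray (y+1) x + pvCell gray (y+1) (x+1) + pvCell gray (y+1) (x+2) := by
  unfold pvCell
  rw [if_pos (show 1 ≤ y + 1 ∧ y + 1 ≤ gray.length ∧ 1 ≤ x + 1 ∧
        x + 1 ≤ (gray.getD 0 []).length by omega),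
      PySem.List.getD_map_range _ _ _ _ hx]
  by_cases hx1 : 1 ≤ x
  all_goals by_cases hx2 : x + 1 < (gray.getD 0 []).length
  · rw [if_pos hx1, if_pos hx2,
        if_pos (show 1 ≤ y + 1 ∧ y + 1 ≤ gray.length ∧ 1 ≤ x ∧
          x ≤ (gray.getD 0 []).length by omega),
        if_pos (show 1 ≤ y + 1 ∧ y + 1 ≤ gray.length ∧ 1 ≤ x + 2 ∧
          x + 2 ≤ (gray.getD 0 []).length by omega),
        PySem.List.getD_map_range _ _ _ _ (show x - 1 < (gray.getD 0 []).length by omega),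
        PySem.List.getD_map_range _ _ _ _ (show x + 1 < (gray.getD 0 []).length from hx2)]
    simp
  · rw [if_pos hx1, if_neg hx2,
        if_pos (show 1 ≤ y + 1 ∧ y + 1 ≤ gray.length ∧ 1 ≤ x ∧
          x ≤ (gray.getD 0 []).length by omega),
        if_neg (show ¬(1 ≤ y + 1 ∧ y + 1 ≤ gray.length ∧ 1 ≤ x + 2 ∧
          x + 2 ≤ (gray.getD 0 []).length) by omega),
        PySem.List.getD_map_range _ _ _ _ (show x - 1 < (gray.getD 0 []).length by omega)]
    simp
  · rw [if_neg hx1, if_pos hx2,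
        if_neg (show ¬(1 ≤ y + 1 ∧ y + 1 ≤ gray.length ∧ 1 ≤ x ∧
          x ≤ (gray.getD 0 []).length) by omega),
        if_pos (show 1 ≤ y + 1 ∧ y + 1 ≤ gray.length ∧ 1 ≤ x + 2 ∧
          x + 2 ≤ (gray.getD 0 []).length by omega),
        PySem.List.getD_map_range _ _ _ _ (show x + 1 < (gray.getD 0 []).length from hx2)]
    simp
  · rw [if_neg hx1, if_neg hx2,
        if_neg (show ¬(1 ≤ y + 1 ∧ y + 1 ≤ gray.length ∧ 1 ≤ x ∧
          x ≤ (gray.getD 0 []).length) by omega),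
        if_neg (show ¬(1 ≤ y + 1 ∧ y + 1 ≤ gray.length ∧ 1 ≤ x + 2 ∧
          x + 2 ≤ (gray.getD 0 []).length) by omega)]
    simp

lemma clamp_eq (g S : Int) :
    ((max 0 (min 255 (g + (g - S))), max 0 (min 255 (g + (g - S))),
      max 0 (min 255 (g + (g - S)))) : Int × Int × Int)
    = if 2 * g - S < 0 then ((0:Int),(0:Int),(0:Int))
      else if 255 < 2 * g - S then (255,255,255) else (2*g-S, 2*g-S, 2*g-S) := by
  split_ifs <;> simp [Prod.mk.injEq] <;> omega

-- ===== VERDICT (by name: the statement is the Claim_ definition above) =====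
theorem unsharp_mask_spec : Claim_equal_unsharp_mask := by
  intro gray _ hpre
  obtain ⟨hne, hrow⟩ := hpre
  unfold Spec_unsharp_mask unsharp_mask unsharp_mask_alt pvBox3x3
  simp only [List.map_map]
  apply List.map_congr_left
  intro y hy
  simp only [List.mem_range] at hy
  apply List.map_congr_left
  intro x hx
  simp only [List.mem_range] at hx
  -- blur value on the A side
  rw [PySem.List.getD_map_range _ _ _ _ hy, PySem.List.getD_map_range _ _ _ _ hx]
  rw [sumA_eq gray hne y x hy hx]
  -- tables on the B side
  rw [PySem.List.getD_map_range _ _ _ _ hy]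
  rw [PySem.List.getD_map_range _ _ _ _ hx]
  have hsrow : ∀ r, r < gray.length →
      ((List.map ((fun row => List.map (fun x =>
            (if 1 ≤ x then row.getD (x - 1) 0 else 0) + row.getD x 0 +
              if x + 1 < (gray.getD 0 []).length then row.getD (x + 1) 0 else 0)
            (List.range (gray.getD 0 []).length)) ∘ fun y =>
          List.map (fun x => ((gray.getD y []).getD x ((0:Int),(0:Int),(0:Int))).1)
            (List.range (gray.getD 0 []).length))
          (List.range gray.length)).getD r []).getD x 0
        = pvCell gray (r+1) x + pvCell gray (r+1) (x+1) + pvCell gray (r+1) (x+2) := by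
    intro r hr
    rw [PySem.List.getD_map_range _ _ _ _ hr]
    simp only [Function.comp]
    rw [PySem.List.getD_map_range _ _ _ _ hx]
    exact hs_entry gray r x hr hx
  have cell_hi : ∀ r c, gray.length < r → pvCell gray r c = 0 := by
    intro r c h; unfold pvCell; rw [if_neg (by omega)]
  have cell_lo : ∀ c, pvCell gray 0 c = 0 := by
    intro c; unfold pvCell; rw [if_neg (by omega)]
  have hrep : (List.replicate ((gray.getD 0 []).length) (0:Int)).getD x 0 = 0 := by simp
  by_cases hy1 : 1 ≤ y
  all_goals by_cases hy2 : y + 1 < gray.length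
  · rw [if_pos hy1, if_pos hy2, hsrow (y-1) (by omega), hsrow y hy, hsrow (y+1) hy2,
        show y - 1 + 1 = y by omega, show y + 1 + 1 = y + 2 by omega]
    exact clamp_eq _ _
  · rw [if_pos hy1, if_neg hy2, hsrow (y-1) (by omega), hsrow y hy,
        show y - 1 + 1 = y by omega,
        cell_hi (y+2) x (by omega), cell_hi (y+2) (x+1) (by omega),
        cell_hi (y+2) (x+2) (by omega)]
    rw [hrep]
    simp only [add_zero]
    exact clamp_eq _ _
  · have hy0 : y = 0 := by omega
    subst hy0
    rw [if_neg hy1, if_pos hy2, hsrow 0 hy, hsrow 1 hy2,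
        show (1:Nat) + 1 = 0 + 2 from rfl,
        cell_lo x, cell_lo (x+1), cell_lo (x+2)]
    rw [hrep]
    simp only [add_zero, zero_add]
    exact clamp_eq _ _
  · have hy0 : y = 0 := by omega
    subst hy0
    rw [if_neg hy1, if_neg hy2, hsrow 0 hy,
        cell_lo x, cell_lo (x+1), cell_lo (x+2),
        cell_hi (0+2) x (by omega), cell_hi (0+2) (x+1) (by omega),
        cell_hi (0+2) (x+2) (by omega)]
    rw [hrep]
    simp only [add_zero, zero_add]
    exact clamp_eq _ _
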